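-- pv_equiv track=rewrite | github.com/byllyfish/shellous | tests/unix/test_readme.py | _separate_cmds_and_outputs
-- ===== SOURCE A (Python) =====
-- _PROMPT = ">>> "
--
-- def _separate_cmds_and_outputs(lines):
--     "Generator to separate commands from outputs."
--     cmd = None
--     output = ""
--
--     for line in lines:
--         if line.startswith(_PROMPT):
--             if cmd is not None:
--                 yield (cmd, output.rstrip("\n"))
--             cmd = line[4:]
--             output = ""
--         else:
--             output += f"{line}\n"
--
--     yield (cmd, output.rstrip("\n"))
-- ===== SOURCE B (Python) =====
-- _PROMPT = ">>> "
--
-- def _separate_cmds_and_outputs(lines):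
--     "Generator to separate commands from outputs (segment-scan reimplementation)."
--     lines = list(lines)
--     n = len(lines)
--     k = 0
--     while k < n and not lines[k].startswith(_PROMPT):
--         k += 1
--     if k == n:
--         yield (None, "\n".join(lines).rstrip("\n"))
--         return
--     while k < n:
--         j = k + 1
--         while j < n and not lines[j].startswith(_PROMPT):
--             j += 1
--         yield (lines[k][4:], "\n".join(lines[k + 1:j]).rstrip("\n"))
--         k = j
-- ===== Notes on version B (the rewrite author's own statement) =====
-- stated objective: alternative
-- what changed: Replaces A's single stateful fold carrying a pending (cmd, accumulated-output-string) pair with an index/segment scan: skip to the first prompt, then for each prompt join the whole block of following non-prompt lines at once.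
import Mathlib
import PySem

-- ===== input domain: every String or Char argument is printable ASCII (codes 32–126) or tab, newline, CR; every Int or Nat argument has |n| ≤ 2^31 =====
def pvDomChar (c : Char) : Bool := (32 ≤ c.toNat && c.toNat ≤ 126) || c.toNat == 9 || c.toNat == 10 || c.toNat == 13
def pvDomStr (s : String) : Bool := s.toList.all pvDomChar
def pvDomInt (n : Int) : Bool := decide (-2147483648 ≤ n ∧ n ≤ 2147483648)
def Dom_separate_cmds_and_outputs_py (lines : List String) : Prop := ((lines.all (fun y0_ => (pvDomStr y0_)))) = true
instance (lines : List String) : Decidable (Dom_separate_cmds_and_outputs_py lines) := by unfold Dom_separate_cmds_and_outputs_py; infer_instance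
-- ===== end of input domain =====

-- ===== PORT A =====
-- A: one stateful pass carrying the pending command and an accumulated output string.
-- pvRstripNL is an exact hand port of Python's s.rstrip("\n") (PySem has no chars-argument rstrip).
def pvRstripNL (cs : List Char) : List Char := (cs.reverse.dropWhile (fun c => c == '\n')).reverse

def pvALoop : List String → Option String → List Char → List (Option String × String)
  | [], cmd, output => [(cmd, String.ofList (pvRstripNL output))]
  | line :: rest, cmd, output =>
    if PySem.Str.startswith line ">>> " = true then
      (match cmd with
       | some c => [(some c, String.ofList (pvRstripNL output))]
       | none => []) ++
      pvALoop rest (some (String.ofList (PySem.List.slice line.toList (some 4) none))) []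
    else
      pvALoop rest cmd (output ++ line.toList ++ ['\n'])

def separate_cmds_and_outputs_py (lines : List String) : List (Option String × String) :=
  pvALoop lines none []

-- ===== PORT B =====
-- B: segment scan — skip to the first prompt, then for each prompt join the whole block
-- of following non-prompt lines at once (the while-loop scans are takeWhile/dropWhile).
def pvNotPrompt (l : String) : Bool := !(PySem.Str.startswith l ">>> ")

def pvBSegs : List String → List (Option String × String)
  | [] => []
  | p :: rest =>
      (some (String.ofList (PySem.List.slice p.toList (some 4) none)),
       String.ofList (pvRstripNL (PySem.Chars.join ['\n'] ((rest.takeWhile pvNotPrompt).map String.toList))))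
      :: pvBSegs (rest.dropWhile pvNotPrompt)
termination_by l => l.length
decreasing_by simpa using Nat.lt_succ_of_le (List.length_dropWhile_le pvNotPrompt rest)

def separate_cmds_and_outputs_py_alt (lines : List String) : List (Option String × String) :=
  match lines.dropWhile pvNotPrompt with
  | [] => [(none, String.ofList (pvRstripNL (PySem.Chars.join ['\n'] (lines.map String.toList))))]
  | p :: t => pvBSegs (p :: t)

-- ===== PRECONDITION & SPEC =====
def Spec_separate_cmds_and_outputs_py (lines : List String) (out : List (Option String × String)) : Prop := out = separate_cmds_and_outputs_py_alt lines
instance (lines : List String) (out : List (Option String × String)) : Decidable (Spec_separate_cmds_and_outputs_py lines out) := by unfold Spec_separate_cmds_and_outputs_py; infer_instance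

-- ===== CLAIM (what is proved, stated in full; the proofs are below) =====
def Claim_equal_separate_cmds_and_outputs_py : Prop := ∀ (lines : List String), Dom_separate_cmds_and_outputs_py lines → Spec_separate_cmds_and_outputs_py lines (separate_cmds_and_outputs_py lines)

-- ===== LEMMAS AND PROOFS =====
-- what A's output accumulator holds after a run of non-prompt lines
def pvConcatNL (ls : List String) : List Char := (ls.map (fun l => l.toList ++ ['\n'])).flatten

theorem pvALoop_acc (seg : List String) (hseg : ∀ l ∈ seg, pvNotPrompt l = true) :
    ∀ (rest : List String) (cmd : Option String) (out : List Char),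
    pvALoop (seg ++ rest) cmd out = pvALoop rest cmd (out ++ pvConcatNL seg) := by
  induction seg with
  | nil => intro rest cmd out; simp [pvConcatNL]
  | cons l seg ih =>
      intro rest cmd out
      have hl : pvNotPrompt l = true := hseg l (by simp)
      have hl' : PySem.Str.startswith l ">>> " = false := by
        simpa [pvNotPrompt] using hl
      have hl2 : PySem.Chars.startswith l.toList ['>', '>', '>', ' '] = false := by
        simpa using hl'
      have ih' := ih (fun x hx => hseg x (by simp [hx]))
      simp [pvALoop, hl2, ih', pvConcatNL, List.append_assoc]

theorem pvRstripNL_snoc_nl (cs : List Char) : pvRstripNL (cs ++ ['\n']) = pvRstripNL cs := by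
  simp [pvRstripNL]

theorem pvConcatNL_eq_join (ls : List String) (h : ls ≠ []) :
    pvConcatNL ls = PySem.Chars.join ['\n'] (ls.map String.toList) ++ ['\n'] := by
  induction ls with
  | nil => exact absurd rfl h
  | cons a t ih =>
      cases t with
      | nil => simp [pvConcatNL, PySem.Chars.join_singleton]
      | cons b u =>
          have := ih (by simp)
          simp [pvConcatNL, PySem.Chars.join_cons_cons] at this ⊢
          simp [this]

theorem pvRstrip_concat_eq_join (ls : List String) :
    pvRstripNL (pvConcatNL ls) = pvRstripNL (PySem.Chars.join ['\n'] (ls.map String.toList)) := by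
  cases h : ls with
  | nil => simp [pvConcatNL, PySem.Chars.join_nil]
  | cons a t =>
      rw [pvConcatNL_eq_join (a :: t) (by simp), pvRstripNL_snoc_nl]

theorem pvDropWhile_head_false {p : String → Bool} :
    ∀ (l : List String) (q : String) (u : List String), l.dropWhile p = q :: u → p q = false := by
  intro l
  induction l with
  | nil => intro q u h; simp [List.dropWhile] at h
  | cons a t ih =>
      intro q u h
      by_cases ha : p a = true
      · exact ih q u (by simpa [List.dropWhile, ha] using h)
      · have : a = q := by simp [List.dropWhile, ha] at h; exact h.1
        subst this; simpa using ha

theorem pvMain (n : Nat) : ∀ (rest : List String) (p : String), rest.length ≤ n →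
    pvALoop rest (some (String.ofList (PySem.List.slice p.toList (some 4) none))) [] = pvBSegs (p :: rest) := by
  induction n with
  | zero =>
      intro rest p h
      have : rest = [] := List.eq_nil_of_length_eq_zero (Nat.le_zero.mp h)
      subst this
      simp [pvALoop, pvBSegs, PySem.Chars.join_nil, pvRstripNL]
  | succ n ih =>
      intro rest p h
      have hsplit : rest.takeWhile pvNotPrompt ++ rest.dropWhile pvNotPrompt = rest :=
        List.takeWhile_append_dropWhile
      have hseg : ∀ l ∈ rest.takeWhile pvNotPrompt, pvNotPrompt l = true :=
        fun l hl => List.mem_takeWhile_imp hl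
      have hacc := pvALoop_acc (rest.takeWhile pvNotPrompt) hseg
        (rest.dropWhile pvNotPrompt) (some (String.ofList (PySem.List.slice p.toList (some 4) none))) []
      rw [hsplit] at hacc
      cases hd : rest.dropWhile pvNotPrompt with
      | nil =>
          rw [hacc, hd]
          simp [pvALoop, pvBSegs, hd, pvRstrip_concat_eq_join]
      | cons q u =>
          have hq : pvNotPrompt q = false := pvDropWhile_head_false rest q u hd
          have hq' : PySem.Str.startswith q ">>> " = true := by
            simpa [pvNotPrompt] using hq
          have hlen : u.length ≤ n := by
            have h1 : (rest.dropWhile pvNotPrompt).length ≤ rest.length :=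
              List.length_dropWhile_le _ _
            rw [hd] at h1; simp at h1; omega
          rw [hacc, hd]
          simp only [pvALoop, PySem.Str.startswith_eq] at hq' ⊢
          rw [if_pos hq', ih u q hlen]
          simp [pvBSegs, hd, pvRstrip_concat_eq_join]

-- ===== VERDICT (by name: the statement is the Claim_ definition above) =====
theorem separate_cmds_and_outputs_py_spec : Claim_equal_separate_cmds_and_outputs_py := by
  intro lines _
  unfold Spec_separate_cmds_and_outputs_py separate_cmds_and_outputs_py separate_cmds_and_outputs_py_alt
  have hsplit : lines.takeWhile pvNotPrompt ++ lines.dropWhile pvNotPrompt = lines :=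
    List.takeWhile_append_dropWhile
  have hseg : ∀ l ∈ lines.takeWhile pvNotPrompt, pvNotPrompt l = true :=
    fun l hl => List.mem_takeWhile_imp hl
  have hacc := pvALoop_acc (lines.takeWhile pvNotPrompt) hseg (lines.dropWhile pvNotPrompt) none []
  rw [hsplit] at hacc
  cases hd : lines.dropWhile pvNotPrompt with
  | nil =>
      have hall : lines.takeWhile pvNotPrompt = lines := by
        have := hsplit; rw [hd] at this; simpa using this
      rw [hacc, hd]
      simp only [pvALoop, List.nil_append]
      rw [hall, pvRstrip_concat_eq_join lines]
  | cons q u =>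
      have hq : pvNotPrompt q = false := pvDropWhile_head_false lines q u hd
      have hq' : PySem.Str.startswith q ">>> " = true := by
        simpa [pvNotPrompt] using hq
      rw [hacc, hd]
      simp only [pvALoop, PySem.Str.startswith_eq] at hq' ⊢
      rw [if_pos hq']
      simpa using pvMain u.length u q (Nat.le_refl _)
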